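-- pv_equiv track=rewrite | github.com/opotowsky/learn-me-fuel | basicML.py | burnup_label
-- ===== SOURCE A (Python) =====
-- def burnup_label(burn_steps, cooling_ints):
--     """
--     Takes the burnup steps and cooling intervals for each case within the
--     simulation and creates a list of the burnup of the irradiated and cooled/
--     decayed fuels; returns a list to be added as the burnup label to the main
--     dataframe.
--
--     Parameters
--     ----------
--     burn_steps : list of the steps of burnup from the simulation parameters
--     cooling_ints : list of the cooling intervals from the simulation parameters
--
--     Returns
--     -------
--     burnup_list : list of burnups to be applied as a label for a given simulation
--
--     """
--
--     num_cases = len(burn_steps)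
--     steps_per_case = len(cooling_ints) + 2
--     burnup_list = [0, ]
--     for case in range(0, num_cases):
--         for step in range(0, steps_per_case):
--             if (case == 0 and step == 0):
--                 continue
--             elif (case > 0 and step == 0):
--                 burn_step = burn_steps[case-1]
--                 burnup_list.append(burn_step)
--             else:
--                 burn_step = burn_steps[case]
--                 burnup_list.append(burn_step)
--     return burnup_list
-- ===== SOURCE B (Python) =====
-- def burnup_label(burn_steps, cooling_ints):
--     # Closed-form by position: after the leading 0, the element at global
--     # position t (1-based) is burn_steps[(t - 1) // steps_per_case] -- pure
--     # index arithmetic, no per-case blocks and no nested loop.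
--     spc = len(cooling_ints) + 2
--     return [0] + [burn_steps[(t - 1) // spc] for t in range(1, len(burn_steps) * spc)]
-- ===== Notes on version B (the rewrite author's own statement) =====
-- stated objective: alternative
-- what changed: Replaces A's nested per-case/per-step loop with continue and branch logic by a closed-form index map: one flat range over global positions whose label is burn_steps[(t-1)//steps_per_case], derived from the observation that position t belongs to case (t-1)//steps_per_case.
import Mathlib
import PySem

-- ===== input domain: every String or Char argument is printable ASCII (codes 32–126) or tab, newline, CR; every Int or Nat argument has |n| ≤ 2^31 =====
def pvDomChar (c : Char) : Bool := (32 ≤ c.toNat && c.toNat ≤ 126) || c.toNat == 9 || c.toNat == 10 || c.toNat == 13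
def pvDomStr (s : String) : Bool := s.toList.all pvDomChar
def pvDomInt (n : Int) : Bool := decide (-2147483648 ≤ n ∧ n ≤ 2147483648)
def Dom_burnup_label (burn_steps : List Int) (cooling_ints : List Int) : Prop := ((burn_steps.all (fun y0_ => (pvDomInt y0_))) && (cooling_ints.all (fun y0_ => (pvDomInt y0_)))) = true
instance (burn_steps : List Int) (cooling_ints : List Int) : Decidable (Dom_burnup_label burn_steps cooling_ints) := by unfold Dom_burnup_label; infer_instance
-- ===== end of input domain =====

-- B replaces A's nested per-case/per-step loop by a closed-form index map:
-- one flat range of global positions t, labelled burn_steps[(t-1)//steps_per_case]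
-- (objective: alternative).

-- ===== PORT A =====
-- indices case and case-1 are always in range, so pyGetD _ _ 0 is exact here
def burnup_label (burn_steps : List Int) (cooling_ints : List Int) : List Int :=
  let num_cases : Int := burn_steps.length
  let steps_per_case : Int := (cooling_ints.length : Int) + 2
  (PySem.List.pyRange 0 num_cases 1).foldl (fun burnup_list case =>
    (PySem.List.pyRange 0 steps_per_case 1).foldl (fun burnup_list step =>
      if case = 0 ∧ step = 0 then
        burnup_list
      else if case > 0 ∧ step = 0 then
        burnup_list ++ [PySem.List.pyGetD burn_steps (case - 1) 0]
      else
        burnup_list ++ [PySem.List.pyGetD burn_steps case 0]) burnup_list) [0]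

-- ===== PORT B =====
-- the index (t-1)//spc is always nonnegative and < len(burn_steps), so pyGetD _ _ 0 is exact
def burnup_label_alt (burn_steps : List Int) (cooling_ints : List Int) : List Int :=
  let spc : Int := (cooling_ints.length : Int) + 2
  [0] ++ (PySem.List.pyRange 1 ((burn_steps.length : Int) * spc) 1).map
    (fun t => PySem.List.pyGetD burn_steps (PySem.Int.floordiv (t - 1) spc) 0)

-- ===== PRECONDITION & SPEC =====
def Spec_burnup_label (burn_steps : List Int) (cooling_ints : List Int) (out : List Int) : Prop := out = burnup_label_alt burn_steps cooling_ints
instance (burn_steps : List Int) (cooling_ints : List Int) (out : List Int) : Decidable (Spec_burnup_label burn_steps cooling_ints out) := by unfold Spec_burnup_label; infer_instance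

-- ===== CLAIM (what is proved, stated in full; the proofs are below) =====
def Claim_equal_burnup_label : Prop := ∀ (burn_steps : List Int) (cooling_ints : List Int), Dom_burnup_label burn_steps cooling_ints → Spec_burnup_label burn_steps cooling_ints (burnup_label burn_steps cooling_ints)

-- ===== LEMMAS AND PROOFS =====

-- the block contributed by one case: common normal form both ports are reduced to
def pvBlock (burn_steps : List Int) (copies : Nat) (case : Int) : List Int :=
  if case > 0 then PySem.List.pyGetD burn_steps (case - 1) 0 :: List.replicate copies (PySem.List.pyGetD burn_steps case 0)
  else List.replicate copies (PySem.List.pyGetD burn_steps case 0)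

-- A's inner step loop over steps 1..b-1 only ever takes the last branch
theorem tail_fold (burn_steps : List Int) (case : Int) (b : Int) (acc : List Int) :
    List.foldl (fun burnup_list step =>
      if case = 0 ∧ step = 0 then burnup_list
      else if case > 0 ∧ step = 0 then burnup_list ++ [PySem.List.pyGetD burn_steps (case - 1) 0]
      else burnup_list ++ [PySem.List.pyGetD burn_steps case 0]) acc (PySem.List.pyRange 1 b)
    = acc ++ List.replicate (b - 1).toNat (PySem.List.pyGetD burn_steps case 0) := by
  rw [PySem.List.foldl_congr_mem (PySem.List.pyRange 1 b) _
        (fun burnup_list _ => burnup_list ++ [PySem.List.pyGetD burn_steps case 0]) acc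
        (by
          intro a s hs
          rw [PySem.List.mem_pyRange_one] at hs
          have hs0 : ¬ s = 0 := by omega
          simp [hs0])]
  rw [PySem.List.foldl_append_singleton_eq_map, List.map_const', PySem.List.length_pyRange_one]

-- A's inner step loop appends exactly pvBlock (case is a loop index, hence 0 ≤ case)
theorem inner_loop_eq (burn_steps : List Int) (m : Nat) (case : Int) (hcase : 0 ≤ case)
    (acc : List Int) :
    (PySem.List.pyRange 0 ((m : Int) + 2) 1).foldl (fun burnup_list step =>
      if case = 0 ∧ step = 0 then burnup_list
      else if case > 0 ∧ step = 0 then burnup_list ++ [PySem.List.pyGetD burn_steps (case - 1) 0]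
      else burnup_list ++ [PySem.List.pyGetD burn_steps case 0]) acc
    = acc ++ pvBlock burn_steps (m + 1) case := by
  rw [PySem.List.pyRange_one_cons (by omega : (0:Int) < (m : Int) + 2)]
  simp only [List.foldl_cons, zero_add]
  rw [tail_fold]
  have hm : ((m : Int) + 2 - 1).toNat = m + 1 := by omega
  rw [hm, pvBlock]
  by_cases hc : case > 0
  · have hc0 : ¬ case = 0 := by omega
    simp [hc, hc0, List.append_assoc]
  · have hc0 : case = 0 := by omega
    simp [hc0]

theorem burnup_label_eq_flat (burn_steps : List Int) (cooling_ints : List Int) :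
    burnup_label burn_steps cooling_ints
    = [0] ++ (PySem.List.pyRange 0 (burn_steps.length : Int) 1).flatMap
        (pvBlock burn_steps (cooling_ints.length + 1)) := by
  simp only [burnup_label]
  rw [PySem.List.foldl_congr_mem (PySem.List.pyRange 0 (burn_steps.length : Int)) _
        (fun burnup_list case => burnup_list ++ pvBlock burn_steps (cooling_ints.length + 1) case) [0]
        (by
          intro acc case hc
          rw [PySem.List.mem_pyRange_one] at hc
          exact inner_loop_eq burn_steps cooling_ints.length case hc.1 acc)]
  rw [PySem.List.foldl_append_eq_flatMap]

-- the flat index map is constant, equal to pyGetD bs q 0, on a range where (t-1)//spc = q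
theorem map_const_range (bs : List Int) (spc a b q : Int)
    (h : ∀ t, a ≤ t → t < b → PySem.Int.floordiv (t - 1) spc = q) :
    (PySem.List.pyRange a b 1).map
      (fun t => PySem.List.pyGetD bs (PySem.Int.floordiv (t - 1) spc) 0)
    = List.replicate (b - a).toNat (PySem.List.pyGetD bs q 0) := by
  have h2 : ∀ t ∈ PySem.List.pyRange a b 1,
      (fun t => PySem.List.pyGetD bs (PySem.Int.floordiv (t - 1) spc) 0) t
      = (fun _ => PySem.List.pyGetD bs q 0) t := by
    intro t ht
    rw [PySem.List.mem_pyRange_one] at ht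
    simp only
    rw [h t ht.1 ht.2]
  rw [List.map_congr_left h2, List.map_const', PySem.List.length_pyRange_one]

-- B's flat index map, split per case, yields exactly the per-case blocks
theorem map_eq_flat (burn_steps : List Int) (m : Nat) (n : Nat) :
    (PySem.List.pyRange 1 ((n : Int) * ((m : Int) + 2)) 1).map
      (fun t => PySem.List.pyGetD burn_steps (PySem.Int.floordiv (t - 1) ((m : Int) + 2)) 0)
    = (PySem.List.pyRange 0 (n : Int) 1).flatMap (pvBlock burn_steps (m + 1)) := by
  induction n with
  | zero => simp [PySem.List.pyRange_one_eq_nil]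
  | succ n ih =>
    have hspc : (0:Int) < (m : Int) + 2 := by omega
    rw [show ((n + 1 : Nat) : Int) = (n : Int) + 1 by push_cast; ring,
        PySem.List.pyRange_one_succ_right (by exact_mod_cast Nat.zero_le n), List.flatMap_append]
    rw [← ih]
    rcases Nat.eq_zero_or_pos n with hn | hn
    · subst hn
      simp only [Nat.cast_zero, zero_mul, zero_add, one_mul]
      rw [PySem.List.pyRange_one_eq_nil (by omega : (0:Int) ≤ 1), List.map_nil, List.nil_append,
          List.flatMap_cons, List.flatMap_nil, List.append_nil]
      have hblock : pvBlock burn_steps (m + 1) 0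
          = List.replicate (m + 1) (PySem.List.pyGetD burn_steps 0 0) := by
        simp [pvBlock]
      rw [hblock,
          map_const_range burn_steps ((m : Int) + 2) 1 ((m : Int) + 2) 0
            (fun t h1 h2 => (PySem.Int.floordiv_eq_iff_of_pos hspc).mpr
              ⟨by nlinarith, by nlinarith⟩)]
      congr 1
      omega
    · have hn1 : (1:Int) ≤ (n : Int) := by exact_mod_cast hn
      have h1 : (1:Int) ≤ (n : Int) * ((m : Int) + 2) := by nlinarith
      have hlt : (n : Int) * ((m : Int) + 2) < ((n : Int) + 1) * ((m : Int) + 2) := by nlinarith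
      rw [PySem.List.pyRange_one_append 1 ((n : Int) * ((m : Int) + 2))
            (((n : Int) + 1) * ((m : Int) + 2)) h1 (le_of_lt hlt), List.map_append]
      congr 1
      rw [PySem.List.pyRange_one_cons hlt, List.map_cons]
      have hhead : PySem.Int.floordiv ((n : Int) * ((m : Int) + 2) - 1) ((m : Int) + 2)
          = (n : Int) - 1 := by
        apply (PySem.Int.floordiv_eq_iff_of_pos hspc).mpr
        constructor <;> nlinarith
      have htail := map_const_range burn_steps ((m : Int) + 2)
          ((n : Int) * ((m : Int) + 2) + 1) (((n : Int) + 1) * ((m : Int) + 2)) (n : Int)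
          (fun t h1 h2 => (PySem.Int.floordiv_eq_iff_of_pos hspc).mpr
            ⟨by nlinarith, by nlinarith⟩)
      have hlen : (((n : Int) + 1) * ((m : Int) + 2)
          - ((n : Int) * ((m : Int) + 2) + 1)).toNat = m + 1 := by
        have he : ((n : Int) + 1) * ((m : Int) + 2) - ((n : Int) * ((m : Int) + 2) + 1)
            = (m : Int) + 1 := by ring
        rw [he]; omega
      rw [hhead, htail, hlen]
      simp only [List.flatMap_cons, List.flatMap_nil, List.append_nil, pvBlock,
        if_pos (by exact_mod_cast hn : (0:Int) < (n : Int))]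

theorem burnup_label_alt_eq_flat (burn_steps : List Int) (cooling_ints : List Int) :
    burnup_label_alt burn_steps cooling_ints
    = [0] ++ (PySem.List.pyRange 0 (burn_steps.length : Int) 1).flatMap
        (pvBlock burn_steps (cooling_ints.length + 1)) := by
  simp only [burnup_label_alt]
  rw [map_eq_flat burn_steps cooling_ints.length burn_steps.length]

-- ===== VERDICT (by name: the statement is the Claim_ definition above) =====
theorem burnup_label_spec : Claim_equal_burnup_label := by
  intro bs ci _
  unfold Spec_burnup_label
  rw [burnup_label_eq_flat, burnup_label_alt_eq_flat]
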